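-- pv_equiv track=rewrite | github.com/edwardmpearce/adventofcode | 2020/Day5/sol.py | partition_to_index
-- ===== SOURCE A (Python) =====
-- def partition_to_index(partition):
--     """
--     Convert a binary string of length n into an integer between 0 and 2^n - 1 inclusive.
--     The binary string should contain only two types of characters: {F, B} or {L, R}, which
--     act as instructions for a binary search through the list [0, ..., 2^n - 1].
--     The characters F, L indicate that the output integer lies in the lower half of the range, whilst
--     the chars B, R indicate that the output integer lies in the upper half.
--     """
--     # Initialise the search range containing the seat's row/column from 0 to 2^len(partition) - 1
--     low, high = 0, (1 << len(partition)) - 1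
--     # Implement binary search-like algorithm with char check condition for moving left/right
--     for c in partition:
--         midpoint = low + (high - low) // 2
--         if c in {'F', 'L'}:
--             high = midpoint
--         elif c in {'B', 'R'}:
--             low = midpoint + 1
--     # Check that we have narrowed down the search space to a single element (no unexpected characters)
--     assert low == high
--     # Return the search output
--     return low
-- ===== SOURCE B (Python) =====
-- def partition_to_index(partition):
--     """Accumulate the index bit by bit: B/R set the low bit, F/L leave it 0."""
--     result = 0
--     for c in partition:
--         assert c in ('F', 'L', 'B', 'R')
--         result = result * 2 + (1 if c in ('B', 'R') else 0)
--     return result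
-- ===== Notes on version B (the rewrite author's own statement) =====
-- stated objective: simpler
-- what changed: B builds the index as a single bit accumulator (result = 2*result + bit per character) instead of narrowing a (low, high) interval with midpoint arithmetic and a final low == high assert.
-- outside the precondition, e.g. on partition_to_index('FX'): A raises AssertionError, B raises AssertionError
import Mathlib
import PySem

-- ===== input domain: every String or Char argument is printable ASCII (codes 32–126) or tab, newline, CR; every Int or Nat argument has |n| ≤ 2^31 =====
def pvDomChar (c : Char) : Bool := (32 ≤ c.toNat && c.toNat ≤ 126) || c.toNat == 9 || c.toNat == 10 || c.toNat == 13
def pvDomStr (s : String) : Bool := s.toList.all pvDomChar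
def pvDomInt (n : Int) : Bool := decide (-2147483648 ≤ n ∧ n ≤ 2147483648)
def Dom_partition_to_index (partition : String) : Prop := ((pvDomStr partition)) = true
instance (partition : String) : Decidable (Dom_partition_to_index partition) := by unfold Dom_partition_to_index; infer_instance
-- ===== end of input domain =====

-- B replaces A's (low, high) interval narrowing by a single bit accumulator; same cost, simpler state.

-- ===== PORT A =====
-- binary-search loop over the characters, state (low, high)
def partition_to_index (partition : String) : Int :=
  let st := partition.toList.foldl
    (fun (lh : Int × Int) c =>
      let midpoint := lh.1 + PySem.Int.floordiv (lh.2 - lh.1) 2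
      if c = 'F' ∨ c = 'L' then (lh.1, midpoint)
      else if c = 'B' ∨ c = 'R' then (midpoint + 1, lh.2)
      else lh)
    (0, ((1 : Int) <<< partition.toList.length) - 1)
  -- 'assert low == high' raises outside Pre_; inside Pre_ it passes and A returns low
  st.1

-- ===== PORT B =====
def partition_to_index_alt (partition : String) : Int :=
  -- 'assert c in (F,L,B,R)' raises outside Pre_; inside Pre_ the loop is this fold
  partition.toList.foldl (fun r c => r * 2 + (if c = 'B' ∨ c = 'R' then 1 else 0)) 0

-- ===== PRECONDITION & SPEC =====
-- Pre_ excludes strings with a character outside {F,L,B,R}: there A's final assert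
-- (and B's in-loop assert) raises AssertionError, so no value is returned.
def Pre_partition_to_index (partition : String) : Prop :=
  (partition.toList.all (fun c => c == 'F' || c == 'L' || c == 'B' || c == 'R')) = true
instance (partition : String) : Decidable (Pre_partition_to_index partition) := by
  unfold Pre_partition_to_index; infer_instance
def pvWitness_partition_to_index : String := "FB"

def Spec_partition_to_index (partition : String) (out : Int) : Prop := out = partition_to_index_alt partition
instance (partition : String) (out : Int) : Decidable (Spec_partition_to_index partition out) := by unfold Spec_partition_to_index; infer_instance

-- ===== CLAIM (what is proved, stated in full; the proofs are below) =====
def Claim_equal_partition_to_index : Prop := ∀ (partition : String), Dom_partition_to_index partition → Pre_partition_to_index partition → Spec_partition_to_index partition (partition_to_index partition)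

-- ===== LEMMAS AND PROOFS =====

-- Interval invariant: starting from the interval [acc·2^k, acc·2^k + 2^k − 1] (k = remaining
-- characters), A's fold ends with low = high = B's bit-accumulator result.
theorem pv_interval_invariant (cs : List Char)
    (hv : ∀ c ∈ cs, c = 'F' ∨ c = 'L' ∨ c = 'B' ∨ c = 'R') (acc : Int) :
    cs.foldl
      (fun (lh : Int × Int) c =>
        let midpoint := lh.1 + PySem.Int.floordiv (lh.2 - lh.1) 2
        if c = 'F' ∨ c = 'L' then (lh.1, midpoint)
        else if c = 'B' ∨ c = 'R' then (midpoint + 1, lh.2)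
        else lh)
      (acc * 2 ^ cs.length, acc * 2 ^ cs.length + (2 ^ cs.length - 1))
    = (cs.foldl (fun r c => r * 2 + (if c = 'B' ∨ c = 'R' then 1 else 0)) acc,
       cs.foldl (fun r c => r * 2 + (if c = 'B' ∨ c = 'R' then 1 else 0)) acc) := by
  induction cs generalizing acc with
  | nil => simp
  | cons c cs ih =>
    have hc := hv c (List.mem_cons_self ..)
    have hv' : ∀ c ∈ cs, c = 'F' ∨ c = 'L' ∨ c = 'B' ∨ c = 'R' :=
      fun c hm => hv c (List.mem_cons_of_mem _ hm)
    have hmid : PySem.Int.floordiv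
        (acc * 2 ^ (cs.length + 1) + (2 ^ (cs.length + 1) - 1) - acc * 2 ^ (cs.length + 1)) 2
        = 2 ^ cs.length - 1 := by
      have h2 : (2 : Int) ^ (cs.length + 1) = 2 * 2 ^ cs.length := by ring
      rw [PySem.Int.floordiv_eq_ediv_of_pos (by omega)]
      omega
    rcases hc with h | h | h | h <;> subst h <;>
      simp only [List.foldl_cons, List.length_cons, hmid, Char.reduceEq, or_self, or_false,
        or_true, reduceIte, add_zero]
    · rw [show acc * 2 ^ (cs.length + 1) = acc * 2 * 2 ^ cs.length from by ring]
      exact ih hv' (acc * 2)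
    · rw [show acc * 2 ^ (cs.length + 1) = acc * 2 * 2 ^ cs.length from by ring]
      exact ih hv' (acc * 2)
    · rw [show acc * 2 ^ (cs.length + 1) + (2 ^ cs.length - 1) + 1
            = (acc * 2 + 1) * 2 ^ cs.length from by ring,
          show acc * 2 ^ (cs.length + 1) + (2 ^ (cs.length + 1) - 1)
            = (acc * 2 + 1) * 2 ^ cs.length + (2 ^ cs.length - 1) from by ring]
      exact ih hv' (acc * 2 + 1)
    · rw [show acc * 2 ^ (cs.length + 1) + (2 ^ cs.length - 1) + 1
            = (acc * 2 + 1) * 2 ^ cs.length from by ring,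
          show acc * 2 ^ (cs.length + 1) + (2 ^ (cs.length + 1) - 1)
            = (acc * 2 + 1) * 2 ^ cs.length + (2 ^ cs.length - 1) from by ring]
      exact ih hv' (acc * 2 + 1)

-- ===== VERDICT (by name: the statement is the Claim_ definition above) =====
theorem partition_to_index_spec : Claim_equal_partition_to_index := by
  intro partition _ hpre
  unfold Spec_partition_to_index partition_to_index partition_to_index_alt
  have hpre' : ∀ c ∈ partition.toList, c = 'F' ∨ c = 'L' ∨ c = 'B' ∨ c = 'R' := by
    simpa only [Pre_partition_to_index, List.all_eq_true, Bool.or_eq_true, beq_iff_eq,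
      or_assoc] using hpre
  have h := pv_interval_invariant partition.toList hpre' 0
  simp only [zero_mul, zero_add] at h
  have hsh : ((1 : Int) <<< partition.toList.length) - 1 = 2 ^ partition.toList.length - 1 := by
    rw [Int.shiftLeft_eq]; ring
  simp only [hsh, h]
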